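-- pv_equiv track=rewrite | github.com/ShuvalovAnthony/ez_python | Katia/9/25348/25348.py | check
-- ===== SOURCE A (Python) =====
-- def check(row:list):
--     povtor = []
--     uni = []
--     for num in row:
--         if row.count(num) == 3:
--             povtor.append(num)
--         if row.count(num) == 1:
--             uni.append(num)
--
--     return (len(povtor) == 3 and len(uni) == 4) and (max(row) in uni)
-- ===== SOURCE B (Python) =====
-- def check(row: list):
--     # sort-then-group: run lengths of the sorted list are the multiplicities
--     runs = []
--     for num in sorted(row):
--         if runs and runs[-1][0] == num:
--             v, n = runs[-1]
--             runs[-1] = (v, n + 1)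
--         else:
--             runs.append((num, 1))
--     triples = sum(1 for _, n in runs if n == 3)
--     uni = [v for v, n in runs if n == 1]
--     return triples == 1 and len(uni) == 4 and max(row) in uni
-- ===== Notes on version B (the rewrite author's own statement) =====
-- stated objective: faster
-- what changed: Replaced A's per-element row.count scans (two O(n) scans inside the loop) by sorting a copy of the row and run-length grouping it in one pass, then judging the run lengths: exactly one run of length 3 and four runs of length 1, with max(row) among the length-1 values.
import Mathlib
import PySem

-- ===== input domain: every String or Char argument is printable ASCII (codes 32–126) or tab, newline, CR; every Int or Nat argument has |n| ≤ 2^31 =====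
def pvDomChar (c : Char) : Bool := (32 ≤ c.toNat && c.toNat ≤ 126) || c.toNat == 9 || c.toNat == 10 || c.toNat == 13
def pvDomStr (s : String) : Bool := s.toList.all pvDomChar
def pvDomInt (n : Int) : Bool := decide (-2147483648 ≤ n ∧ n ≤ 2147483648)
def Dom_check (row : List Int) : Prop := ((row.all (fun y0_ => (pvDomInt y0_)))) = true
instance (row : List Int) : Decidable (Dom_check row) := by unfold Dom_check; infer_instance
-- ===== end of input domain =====

-- B sorts a copy of the row and run-length groups it in one pass, replacing A's repeated
-- row.count scans; run lengths are the multiplicities (objective: faster).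


-- ===== PORT A =====
-- literal port: one loop over row appending into povtor / uni by row.count tests, then
-- '(len(povtor)==3 and len(uni)==4) and (max(row) in uni)'.  Python's 'and' short-circuits,
-- so max(row) is only evaluated when the left conjunct is true (hence row nonempty):
-- the Option.elim default 'false' is exactly that short-circuit and is never the result
-- of a raised exception.
def check (row : List Int) : Bool :=
  let st := row.foldl (fun (s : List Int × List Int) num =>
    let s := if PySem.List.count row num == 3 then (s.1 ++ [num], s.2) else s
    if PySem.List.count row num == 1 then (s.1, s.2 ++ [num]) else s) ([], [])
  (decide (st.1.length = 3) && decide (st.2.length = 4))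
    && (PySem.List.max? row (fun x => x)).elim false (fun m => decide (m ∈ st.2))

-- ===== PORT B =====
-- Source B's run-building loop: runs is kept head-first (the head is the run currently being
-- extended), mirroring Python's update-of-last / append-at-end; the final .reverse below
-- restores Python's order.
def runStep (rs : List (Int × Nat)) (num : Int) : List (Int × Nat) :=
  match rs with
  | (v, n) :: rest => if v == num then (v, n + 1) :: rest else (num, 1) :: (v, n) :: rest
  | [] => [(num, 1)]

-- literal port of Source B: sort the row, run-length group it, then judge the run lengths.
-- Same remark as in A on the short-circuited max(row).
def check_alt (row : List Int) : Bool :=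
  let runs := ((PySem.List.sorted row (fun x => x) false).foldl runStep []).reverse
  let triples := runs.countP (fun p => p.2 == 3)
  let uni := (runs.filter (fun p => p.2 == 1)).map (fun p => p.1)
  decide (triples = 1) && (decide (uni.length = 4)
    && (PySem.List.max? row (fun x => x)).elim false (fun m => decide (m ∈ uni)))

-- ===== PRECONDITION & SPEC =====
def Spec_check (row : List Int) (out : Bool) : Prop := out = check_alt row
instance (row : List Int) (out : Bool) : Decidable (Spec_check row out) := by unfold Spec_check; infer_instance

-- ===== CLAIM (what is proved, stated in full; the proofs are below) =====
def Claim_equal_check : Prop := ∀ (row : List Int), Dom_check row → Spec_check row (check row)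

-- ===== LEMMAS AND PROOFS =====

-- each distinct value of row with multiplicity n contributes n entries to the
-- multiplicity-n filter of row and one entry to that of its dedup
theorem group_count (row : List Int) (n : Nat) :
    (row.filter (fun x => row.count x == n)).length
      = n * ((PySem.Set.ofList row).filter (fun x => row.count x == n)).length := by
  set p : Int → Bool := fun x => row.count x == n with hp
  have key : (row.filter p).length
      = ∑ a ∈ (row.filter p).toFinset, (row.filter p).count a := by
    have := Multiset.toFinset_sum_count_eq ((row.filter p : List Int) : Multiset Int)
    simpa using this.symm
  rw [key, List.toFinset_filter]
  have hcount : ∀ a ∈ row.toFinset.filter (p ·), (row.filter p).count a = n := by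
    intro a ha
    rw [Finset.mem_filter] at ha
    have hpa : p a = true := ha.2
    rw [List.count_filter hpa]
    have : row.count a == n := hpa
    simpa using this
  rw [Finset.sum_congr rfl hcount, Finset.sum_const, smul_eq_mul]
  have hset : (PySem.Set.ofList row).toFinset = row.toFinset := by
    ext a; simp [PySem.Set.mem_ofList]
  have hlen : ((PySem.Set.ofList row).filter p).length = (row.toFinset.filter (p ·)).card := by
    rw [← hset, ← List.toFinset_filter]
    exact (List.toFinset_card_of_nodup ((PySem.Set.nodup_ofList row).filter p)).symm
  rw [hlen, Nat.mul_comm]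

-- A's loop is two independent filtering loops
theorem A_fold (row : List Int) :
    row.foldl (fun (s : List Int × List Int) num =>
      let s := if PySem.List.count row num == 3 then (s.1 ++ [num], s.2) else s
      if PySem.List.count row num == 1 then (s.1, s.2 ++ [num]) else s) ([], [])
    = (row.filter (fun x => PySem.List.count row x == 3),
       row.filter (fun x => PySem.List.count row x == 1)) := by
  have hstep : (fun (s : List Int × List Int) num =>
      let s := if PySem.List.count row num == 3 then (s.1 ++ [num], s.2) else s
      if PySem.List.count row num == 1 then (s.1, s.2 ++ [num]) else s)
    = fun (s : List Int × List Int) num =>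
      ((fun acc n => if PySem.List.count row n == 3 then acc ++ [n] else acc) s.1 num,
       (fun acc n => if PySem.List.count row n == 1 then acc ++ [n] else acc) s.2 num) := by
    funext s num
    by_cases h3 : List.count num row = 3 <;> by_cases h1 : List.count num row = 1 <;>
      simp [PySem.List.count, h3, h1]
  rw [hstep,
      PySem.List.foldl_prod_mk
        (f := fun acc n => if PySem.List.count row n == 3 then acc ++ [n] else acc)
        (g := fun acc n => if PySem.List.count row n == 1 then acc ++ [n] else acc),
      PySem.List.foldl_append_if_eq_filter, PySem.List.foldl_append_if_eq_filter]
  simp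

theorem runStep_nil (num : Int) : runStep [] num = [(num, 1)] := rfl

theorem runStep_cons (v : Int) (n : Nat) (rest : List (Int × Nat)) (num : Int) :
    runStep ((v, n) :: rest) num
      = if v == num then (v, n + 1) :: rest else (num, 1) :: (v, n) :: rest := rfl

-- elements below the active part of the accumulator are never touched
theorem foldl_runStep_append (l : List Int) :
    ∀ (s rs : List (Int × Nat)), s ≠ [] →
      l.foldl runStep (s ++ rs) = l.foldl runStep s ++ rs := by
  induction l with
  | nil => intro s rs _; rfl
  | cons x t ih =>
    intro s rs hs
    match s with
    | (v, n) :: s' =>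
      rw [List.foldl_cons, List.foldl_cons, List.cons_append, runStep_cons, runStep_cons]
      split
      · simpa using ih ((v, n + 1) :: s') rs (by simp)
      · simpa using ih ((x, 1) :: (v, n) :: s') rs (by simp)

theorem foldl_runStep_replicate (m : Nat) (v : Int) :
    ∀ (n : Nat) (rs : List (Int × Nat)),
      (List.replicate m v).foldl runStep ((v, n) :: rs) = (v, n + m) :: rs := by
  induction m with
  | zero => intro n rs; rfl
  | succ k ih =>
    intro n rs
    rw [List.replicate_succ]
    show List.foldl runStep (runStep ((v,n) :: rs) v) (List.replicate k v) = _
    have hstep : runStep ((v,n) :: rs) v = (v, n + 1) :: rs := by simp [runStep]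
    rw [hstep, ih]
    have h2 : n + 1 + k = n + (k + 1) := by omega
    rw [h2]

-- starting a fold on values all different from the buried run leaves it untouched at the bottom
theorem foldl_runStep_fresh (ys : List Int) (v : Int) (n : Nat) (rs : List (Int × Nat))
    (h : ∀ y ∈ ys, v ≠ y) :
    ys.foldl runStep ((v, n) :: rs) = ys.foldl runStep [] ++ (v, n) :: rs := by
  match ys with
  | [] => rfl
  | y :: t =>
    have hvy : v ≠ y := h y (by simp)
    rw [List.foldl_cons, List.foldl_cons, runStep_cons, runStep_nil,
      if_neg (by simpa using hvy)]
    simpa using foldl_runStep_append t [(y, 1)] ((v, n) :: rs) (by simp)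

-- a sorted list is its head's run followed by a sorted tail of strictly larger values
theorem sorted_split (x : Int) (xs : List Int) (h : (x :: xs).Pairwise (· ≤ ·)) :
    ∃ m ys, xs = List.replicate m x ++ ys ∧ ys.Pairwise (· ≤ ·) ∧ ∀ y ∈ ys, x < y := by
  induction xs with
  | nil => exact ⟨0, [], rfl, List.Pairwise.nil, by simp⟩
  | cons z zs ih =>
    rcases List.pairwise_cons.1 h with ⟨hx, hzs⟩
    by_cases hzx : z = x
    · subst hzx
      have h' : (z :: zs).Pairwise (· ≤ ·) := by
        refine List.pairwise_cons.2 ⟨?_, (List.pairwise_cons.1 hzs).2⟩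
        exact fun y hy => (List.pairwise_cons.1 hzs).1 y hy
      rcases ih h' with ⟨m, ys, heq, hys, hlt⟩
      exact ⟨m + 1, ys, by rw [List.replicate_succ]; simp [heq], hys, hlt⟩
    · refine ⟨0, z :: zs, by simp, hzs, ?_⟩
      intro y hy
      have hxz : x ≤ z := hx z (by simp)
      have hxy : x ≤ y := hx y hy
      rcases List.mem_cons.1 hy with rfl | hyzs
      · exact lt_of_le_of_ne hxz (fun e => hzx e.symm)
      · have : z ≤ y := (List.pairwise_cons.1 hzs).1 y hyzs
        have : x < z := lt_of_le_of_ne hxz (fun e => hzx e.symm)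
        omega

-- the grouping fold of a sorted list yields the (value, multiplicity) pairs of its distinct values
theorem runs_spec : ∀ (N : Nat) (l : List Int), l.length ≤ N → l.Pairwise (· ≤ ·) →
    (∀ p ∈ l.foldl runStep [], p.2 = l.count p.1 ∧ p.1 ∈ l) ∧
    ((l.foldl runStep []).map Prod.fst).Nodup ∧
    (∀ x ∈ l, x ∈ (l.foldl runStep []).map Prod.fst) := by
  intro N
  induction N with
  | zero =>
    intro l hl _
    have : l = [] := List.eq_nil_of_length_eq_zero (Nat.le_zero.1 hl)
    subst this; simp
  | succ k ih =>
    intro l hl hs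
    match l with
    | [] => simp
    | x :: xs =>
      rcases sorted_split x xs hs with ⟨m, ys, heq, hys, hlt⟩
      subst heq
      have hxys : x ∉ ys := fun hx => absurd (hlt x hx) (lt_irrefl x)
      have hfold : ((x :: (List.replicate m x ++ ys)).foldl runStep [])
          = ys.foldl runStep [] ++ [(x, 1 + m)] := by
        show List.foldl runStep (runStep [] x) (List.replicate m x ++ ys) = _
        have h1 : runStep [] x = [(x, 1)] := rfl
        rw [h1, List.foldl_append, foldl_runStep_replicate m x 1 []]
        exact foldl_runStep_fresh ys x (1 + m) [] (fun y hy => ne_of_lt (hlt y hy))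
      have hlen : ys.length ≤ k := by
        have := hl
        simp [List.length_append] at this ⊢
        omega
      rcases ih ys hlen hys with ⟨ha, hb, hc⟩
      have hcount : ∀ z, z ∈ ys → (x :: (List.replicate m x ++ ys)).count z = ys.count z := by
        intro z hz
        have hzx : z ≠ x := fun e => absurd (hlt z hz) (by simp [e])
        simp [List.count_append, List.count_replicate, Ne.symm hzx]
      refine ⟨?_, ?_, ?_⟩
      · intro p hp
        rw [hfold] at hp
        rcases List.mem_append.1 hp with hp | hp
        · rcases ha p hp with ⟨h2, h1⟩
          refine ⟨by rw [hcount p.1 h1]; exact h2, by simp [h1]⟩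
        · have : p = (x, 1 + m) := by simpa using hp
          subst this
          constructor
          · simp [List.count_append, List.count_eq_zero_of_not_mem hxys]
            omega
          · simp
      · rw [hfold]
        rw [List.map_append, List.nodup_append]
        refine ⟨hb, by simp, ?_⟩
        intro a haa
        rcases List.mem_map.1 haa with ⟨p, hp, rfl⟩
        have : p.1 ∈ ys := (ha p hp).2
        have : x ≠ p.1 := ne_of_lt (hlt p.1 this)
        simp
        exact fun e => absurd e.symm this
      · intro z hz
        rw [hfold, List.map_append]
        rcases List.mem_cons.1 hz with rfl | hz'
        · simp
        · rcases List.mem_append.1 hz' with hz'' | hz''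
          · have : z = x := by
              have := List.eq_of_mem_replicate hz''; exact this
            subst this; simp
          · exact List.mem_append.2 (Or.inl (hc z hz''))

theorem check_eq_check_alt (row : List Int) : check row = check_alt row := by
  unfold check check_alt
  simp only [A_fold]
  have hperm : (PySem.List.sorted row (fun x => x) false).Perm row :=
    PySem.List.sorted_perm row (fun x => x) false
  have hpw : (PySem.List.sorted row (fun x => x) false).Pairwise (· ≤ ·) := by
    simpa using PySem.List.sorted_pairwise row (fun x => x)
  obtain ⟨ha, hb, hc⟩ := runs_spec (PySem.List.sorted row (fun x => x) false).length
    (PySem.List.sorted row (fun x => x) false) le_rfl hpw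
  set srt := PySem.List.sorted row (fun x => x) false with hsrt
  set R := srt.foldl runStep [] with hR
  have hcnt : ∀ z, srt.count z = row.count z := fun z => hperm.count_eq z
  have hmemR : ∀ z, z ∈ R.map Prod.fst ↔ z ∈ row := by
    intro z
    constructor
    · intro h
      rcases List.mem_map.1 h with ⟨p, hp, rfl⟩
      exact hperm.mem_iff.1 (ha p hp).2
    · intro h
      exact hc z (hperm.mem_iff.2 h)
  -- the distinct values of row, as two nodup lists with the same members
  have hpermS : (R.map Prod.fst).Perm (PySem.Set.ofList row) := by
    rw [List.perm_ext_iff_of_nodup hb (PySem.Set.nodup_ofList row)]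
    intro a
    rw [hmemR a, PySem.Set.mem_ofList]
  -- run lengths are row multiplicities
  have hlenR : ∀ (n : Nat), R.countP (fun p => p.2 == n)
      = ((PySem.Set.ofList row).filter (fun x => row.count x == n)).length := by
    intro n
    have h1 : R.countP (fun p => p.2 == n)
        = R.countP (fun p => row.count p.1 == n) := by
      apply List.countP_congr
      intro p hp
      have := (ha p hp).1
      simp [this, hcnt p.1]
    rw [h1]
    have h2 : R.countP (fun p => row.count p.1 == n)
        = (R.map Prod.fst).countP (fun x => row.count x == n) := by
      rw [List.countP_map]; rfl
    rw [h2, hpermS.countP_eq, List.countP_eq_length_filter]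
  -- membership in the uni lists agrees
  have huni : ∀ m, (m ∈ row.filter (fun x => PySem.List.count row x == 1))
      ↔ (m ∈ ((R.reverse.filter (fun p => p.2 == 1)).map (fun p => p.1))) := by
    intro m
    simp only [List.mem_filter, List.mem_map, List.mem_reverse, PySem.List.count]
    constructor
    · rintro ⟨hm, hm1⟩
      rcases List.mem_map.1 ((hmemR m).2 hm) with ⟨p, hp, rfl⟩
      refine ⟨p, ⟨hp, ?_⟩, rfl⟩
      have := (ha p hp).1
      simp only [beq_iff_eq] at hm1 ⊢
      rw [this, hcnt p.1, hm1]
    · rintro ⟨p, ⟨hp, hp1⟩, rfl⟩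
      have h2 := (ha p hp).1
      refine ⟨hperm.mem_iff.1 (ha p hp).2, ?_⟩
      simp only [beq_iff_eq] at hp1 ⊢
      rw [← hcnt p.1, ← h2, hp1]
  -- put the pieces together
  have hT3 : (row.filter (fun x => PySem.List.count row x == 3)).length
      = 3 * ((PySem.Set.ofList row).filter (fun x => row.count x == 3)).length := by
    simpa [PySem.List.count] using group_count row 3
  have hU1 : (row.filter (fun x => PySem.List.count row x == 1)).length
      = ((PySem.Set.ofList row).filter (fun x => row.count x == 1)).length := by
    simpa [PySem.List.count] using group_count row 1
  have hcp3 : R.reverse.countP (fun p => p.2 == 3) = R.countP (fun p => p.2 == 3) := by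
    rw [List.countP_eq_length_filter, List.countP_eq_length_filter,
      List.filter_reverse, List.length_reverse]
  have hlu : ((R.reverse.filter (fun p => p.2 == 1)).map (fun p => p.1)).length
      = ((PySem.Set.ofList row).filter (fun x => row.count x == 1)).length := by
    rw [List.length_map, List.filter_reverse, List.length_reverse,
      ← List.countP_eq_length_filter, hlenR 1]
  simp only [hT3, hU1, hcp3, hlenR 3]
  set T := ((PySem.Set.ofList row).filter (fun x => row.count x == 3)).length
  set U := ((PySem.Set.ofList row).filter (fun x => row.count x == 1)).length
  have d1 : decide (3 * T = 3) = decide (T = 1) := decide_eq_decide.mpr (by omega)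
  rw [d1, hlu]
  cases h : PySem.List.max? row (fun x => x) with
  | none => simp
  | some m =>
    simp only [Option.elim, Bool.and_assoc]
    have := huni m
    have dm : decide (m ∈ row.filter (fun x => PySem.List.count row x == 1))
        = decide (m ∈ ((R.reverse.filter (fun p => p.2 == 1)).map (fun p => p.1))) :=
      decide_eq_decide.mpr this
    rw [dm]

-- ===== VERDICT (by name: the statement is the Claim_ definition above) =====
theorem check_spec : Claim_equal_check := by
  intro row _
  unfold Spec_check
  exact check_eq_check_alt row
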